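-- pv_equiv track=rewrite | github.com/taylanbakircioglu/flowfish | backend/routers/changes.py | _get_change_category
-- ===== SOURCE A (Python) =====
-- def _get_change_category(change_type: str) -> dict:
--     """Categorize change type for UI grouping"""
--     categories = {
--         "infrastructure": {
--             "types": [
--                 "replica_changed", "config_changed", "image_changed", "label_changed",
--                 "workload_added", "workload_removed", "namespace_changed",
--                 "resource_changed", "env_changed", "spec_changed",
--                 "service_port_changed", "service_selector_changed", "service_type_changed",
--                 "service_added", "service_removed",
--                 "network_policy_added", "network_policy_removed", "network_policy_changed",
--                 "ingress_added", "ingress_removed", "ingress_changed",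
--                 "route_added", "route_removed", "route_changed",
--             ],
--             "icon": "CloudServerOutlined",
--             "color": "#0891b2",
--             "description": "Infrastructure changes affect workload configurations and deployments"
--         },
--         "network": {
--             "types": ["connection_added", "connection_removed", "port_changed"],
--             "icon": "ApiOutlined",
--             "color": "#4d9f7c",
--             "description": "Network changes affect service-to-service communications"
--         },
--         "behavioral": {
--             "types": ["traffic_anomaly", "dns_anomaly", "process_anomaly", "error_anomaly"],
--             "icon": "AlertOutlined",
--             "color": "#d4756a",
--             "description": "Behavioral anomalies detected through eBPF monitoring"
--         }
--     }
--
--     for category, info in categories.items():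
--         if change_type in info["types"]:
--             return {
--                 "name": category,
--                 "icon": info["icon"],
--                 "color": info["color"],
--                 "description": info["description"]
--             }
--
--     return {
--         "name": "other",
--         "icon": "QuestionCircleOutlined",
--         "color": "#8c8c8c",
--         "description": "Other changes"
--     }
-- ===== SOURCE B (Python) =====
-- # B: two-stage lookup — a flat type->category-name table plus a small
-- # category-name->(icon, color, description) metadata table; no scanning loop.
--
-- _TYPE_TO_CAT = {
--     "replica_changed": "infrastructure",
--     "config_changed": "infrastructure",
--     "image_changed": "infrastructure",
--     "label_changed": "infrastructure",
--     "workload_added": "infrastructure",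
--     "workload_removed": "infrastructure",
--     "namespace_changed": "infrastructure",
--     "resource_changed": "infrastructure",
--     "env_changed": "infrastructure",
--     "spec_changed": "infrastructure",
--     "service_port_changed": "infrastructure",
--     "service_selector_changed": "infrastructure",
--     "service_type_changed": "infrastructure",
--     "service_added": "infrastructure",
--     "service_removed": "infrastructure",
--     "network_policy_added": "infrastructure",
--     "network_policy_removed": "infrastructure",
--     "network_policy_changed": "infrastructure",
--     "ingress_added": "infrastructure",
--     "ingress_removed": "infrastructure",
--     "ingress_changed": "infrastructure",
--     "route_added": "infrastructure",
--     "route_removed": "infrastructure",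
--     "route_changed": "infrastructure",
--     "connection_added": "network",
--     "connection_removed": "network",
--     "port_changed": "network",
--     "traffic_anomaly": "behavioral",
--     "dns_anomaly": "behavioral",
--     "process_anomaly": "behavioral",
--     "error_anomaly": "behavioral",
-- }
--
-- _META = {
--     "infrastructure": ("CloudServerOutlined", "#0891b2",
--                        "Infrastructure changes affect workload configurations and deployments"),
--     "network": ("ApiOutlined", "#4d9f7c",
--                 "Network changes affect service-to-service communications"),
--     "behavioral": ("AlertOutlined", "#d4756a",
--                    "Behavioral anomalies detected through eBPF monitoring"),
--     "other": ("QuestionCircleOutlined", "#8c8c8c", "Other changes"),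
-- }
--
--
-- def _get_change_category(change_type: str) -> dict:
--     """Categorize change type for UI grouping"""
--     cat = _TYPE_TO_CAT.get(change_type, "other")
--     icon, color, description = _META[cat]
--     return {"name": cat, "icon": icon, "color": color, "description": description}
-- ===== Notes on version B (the rewrite author's own statement) =====
-- stated objective: idiomatic
-- what changed: Replaces A's per-call loop over categories with an inner membership scan by a two-stage table lookup: a flat type->category-name dict plus a small category-name->metadata dict (with 'other' as the .get default), so the function body is two keyed lookups and no scanning.
import Mathlib
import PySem

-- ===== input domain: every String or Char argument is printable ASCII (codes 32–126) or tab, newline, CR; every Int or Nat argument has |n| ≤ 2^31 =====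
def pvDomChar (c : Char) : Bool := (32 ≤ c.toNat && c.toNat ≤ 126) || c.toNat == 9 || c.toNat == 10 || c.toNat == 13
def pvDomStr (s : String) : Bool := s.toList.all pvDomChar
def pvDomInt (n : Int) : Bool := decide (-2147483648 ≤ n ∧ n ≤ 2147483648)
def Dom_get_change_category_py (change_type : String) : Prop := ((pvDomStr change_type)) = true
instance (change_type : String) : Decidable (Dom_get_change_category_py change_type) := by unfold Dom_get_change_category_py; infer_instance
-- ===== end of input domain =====

-- B replaces A's per-call loop over categories (with inner membership test) by a
-- two-stage lookup: a flat type->category-name table plus a small metadata table.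

-- ===== PORT A =====
-- A's categories dict: (name, types, icon, color, description), in insertion order.
def pvACategories : List (String × List String × String × String × String) :=
  [ ("infrastructure",
     ["replica_changed", "config_changed", "image_changed", "label_changed",
      "workload_added", "workload_removed", "namespace_changed",
      "resource_changed", "env_changed", "spec_changed",
      "service_port_changed", "service_selector_changed", "service_type_changed",
      "service_added", "service_removed",
      "network_policy_added", "network_policy_removed", "network_policy_changed",
      "ingress_added", "ingress_removed", "ingress_changed",
      "route_added", "route_removed", "route_changed"],
     "CloudServerOutlined", "#0891b2",
     "Infrastructure changes affect workload configurations and deployments"),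
    ("network",
     ["connection_added", "connection_removed", "port_changed"],
     "ApiOutlined", "#4d9f7c",
     "Network changes affect service-to-service communications"),
    ("behavioral",
     ["traffic_anomaly", "dns_anomaly", "process_anomaly", "error_anomaly"],
     "AlertOutlined", "#d4756a",
     "Behavioral anomalies detected through eBPF monitoring") ]

-- A's loop: for category, info in categories.items(): if change_type in info["types"]: return …
def pvALoop (cats : List (String × List String × String × String × String))
    (change_type : String) : List (String × String) :=
  match cats with
  | [] =>
      [("name", "other"), ("icon", "QuestionCircleOutlined"),
       ("color", "#8c8c8c"), ("description", "Other changes")]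
  | (category, types, icon, color, desc) :: rest =>
      if types.contains change_type then
        [("name", category), ("icon", icon), ("color", color), ("description", desc)]
      else
        pvALoop rest change_type

def get_change_category_py (change_type : String) : List (String × String) :=
  pvALoop pvACategories change_type

-- ===== PORT B =====
-- Source B's _TYPE_TO_CAT dict literal (all keys distinct).
def pvTypeToCat : List (String × String) :=
  [ ("replica_changed", "infrastructure"),
    ("config_changed", "infrastructure"),
    ("image_changed", "infrastructure"),
    ("label_changed", "infrastructure"),
    ("workload_added", "infrastructure"),
    ("workload_removed", "infrastructure"),
    ("namespace_changed", "infrastructure"),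
    ("resource_changed", "infrastructure"),
    ("env_changed", "infrastructure"),
    ("spec_changed", "infrastructure"),
    ("service_port_changed", "infrastructure"),
    ("service_selector_changed", "infrastructure"),
    ("service_type_changed", "infrastructure"),
    ("service_added", "infrastructure"),
    ("service_removed", "infrastructure"),
    ("network_policy_added", "infrastructure"),
    ("network_policy_removed", "infrastructure"),
    ("network_policy_changed", "infrastructure"),
    ("ingress_added", "infrastructure"),
    ("ingress_removed", "infrastructure"),
    ("ingress_changed", "infrastructure"),
    ("route_added", "infrastructure"),
    ("route_removed", "infrastructure"),
    ("route_changed", "infrastructure"),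
    ("connection_added", "network"),
    ("connection_removed", "network"),
    ("port_changed", "network"),
    ("traffic_anomaly", "behavioral"),
    ("dns_anomaly", "behavioral"),
    ("process_anomaly", "behavioral"),
    ("error_anomaly", "behavioral") ]

-- Source B's _META dict literal: category name -> (icon, color, description).
def pvMeta : List (String × String × String × String) :=
  [ ("infrastructure", "CloudServerOutlined", "#0891b2",
     "Infrastructure changes affect workload configurations and deployments"),
    ("network", "ApiOutlined", "#4d9f7c",
     "Network changes affect service-to-service communications"),
    ("behavioral", "AlertOutlined", "#d4756a",
     "Behavioral anomalies detected through eBPF monitoring"),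
    ("other", "QuestionCircleOutlined", "#8c8c8c", "Other changes") ]

-- cat = _TYPE_TO_CAT.get(change_type, "other"); icon, color, d = _META[cat]; return {...}
def get_change_category_py_alt (change_type : String) : List (String × String) :=
  let cat : String :=
    match pvTypeToCat.find? (fun kv => kv.1 == change_type) with
    | some kv => kv.2
    | none => "other"
  match pvMeta.find? (fun kv => kv.1 == cat) with
  | some (_, icon, color, description) =>
      [("name", cat), ("icon", icon), ("color", color), ("description", description)]
  | none => []  -- _META[cat] KeyError; unreachable: every category name is a _META key

-- ===== PRECONDITION & SPEC =====
def Spec_get_change_category_py (change_type : String) (out : List (String × String)) : Prop := out = get_change_category_py_alt change_type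
instance (change_type : String) (out : List (String × String)) : Decidable (Spec_get_change_category_py change_type out) := by unfold Spec_get_change_category_py; infer_instance

-- ===== CLAIM =====
def Claim_equal_get_change_category_py : Prop := ∀ (change_type : String), Dom_get_change_category_py change_type → Spec_get_change_category_py change_type (get_change_category_py change_type)

-- ===== LEMMAS AND PROOFS =====

-- The three key blocks of pvTypeToCat, as lists (proof bookkeeping only).
def pvInfraTypes : List String :=
  ["replica_changed", "config_changed", "image_changed", "label_changed",
   "workload_added", "workload_removed", "namespace_changed",
   "resource_changed", "env_changed", "spec_changed",
   "service_port_changed", "service_selector_changed", "service_type_changed",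
   "service_added", "service_removed",
   "network_policy_added", "network_policy_removed", "network_policy_changed",
   "ingress_added", "ingress_removed", "ingress_changed",
   "route_added", "route_removed", "route_changed"]
def pvNetTypes : List String := ["connection_added", "connection_removed", "port_changed"]
def pvBehTypes : List String := ["traffic_anomaly", "dns_anomaly", "process_anomaly", "error_anomaly"]

theorem pvTypeToCat_eq :
    pvTypeToCat =
      (pvInfraTypes.map fun t => (t, "infrastructure")) ++
      ((pvNetTypes.map fun t => (t, "network")) ++
       ((pvBehTypes.map fun t => (t, "behavioral")) ++ [])) := rfl

-- Looking up k in a block of entries that all map to the same value r, followed by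
-- rest, is: r if k is one of the block's keys, else the lookup in rest.
theorem find_map_const_block {β : Type} (l : List String) (r : β)
    (rest : List (String × β)) (k : String) :
    ((l.map fun t => (t, r)) ++ rest).find? (fun kv => kv.1 == k) =
      (if l.contains k then some (k, r) else rest.find? (fun kv => kv.1 == k)) := by
  induction l with
  | nil => simp
  | cons t ts ih =>
      by_cases h : t = k
      · subst h; simp
      · simp only [List.map, List.cons_append, List.find?, List.contains_cons]
        have hb : (t == k) = false := by simp [h]
        have hk : ¬ k = t := fun hh => h hh.symm
        simp [hb, ih, hk]

theorem get_change_category_py_eq (change_type : String) :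
    get_change_category_py change_type = get_change_category_py_alt change_type := by
  unfold get_change_category_py get_change_category_py_alt
  rw [pvTypeToCat_eq, find_map_const_block, find_map_const_block, find_map_const_block]
  simp only [pvALoop, pvACategories, pvInfraTypes, pvNetTypes, pvBehTypes]
  split_ifs <;> rfl

-- ===== VERDICT =====
theorem get_change_category_py_spec : Claim_equal_get_change_category_py := by
  intro ct _
  exact get_change_category_py_eq ct
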